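-- pv_equiv track=rewrite | github.com/connoryang/1v1dec | eve/client/script/ui/structure/accessGroups/accessGroupsController.py | _GetNewAndOldMemberInfo
-- ===== SOURCE A (Python) =====
-- def _GetNewAndOldMemberInfo(memberIDs, currentGroupMemberIDs, membershipType):
--     oldMemberIDs = set()
--     newMembersAndMembershipType = {}
--     for memberID in memberIDs:
--         if memberID in currentGroupMemberIDs:
--             oldMemberIDs.add(memberID)
--         else:
--             newMembersAndMembershipType[memberID] = membershipType
--
--     return (oldMemberIDs, newMembersAndMembershipType)
-- ===== SOURCE B (Python) =====
-- def _GetNewAndOldMemberInfo(memberIDs, currentGroupMemberIDs, membershipType):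
--     # Build the dict of ALL members first (dedup + order via dict.fromkeys),
--     # then carve the existing ones out of it in place.
--     newMembersAndMembershipType = dict.fromkeys(memberIDs, membershipType)
--     current = set(currentGroupMemberIDs)
--     oldMemberIDs = {m for m in newMembersAndMembershipType if m in current}
--     for m in oldMemberIDs:
--         del newMembersAndMembershipType[m]
--     return (oldMemberIDs, newMembersAndMembershipType)
-- ===== Notes on version B (the rewrite author's own statement) =====
-- stated objective: alternative
-- what changed: Instead of one pass over memberIDs with a per-element membership test and an if/else branch, B first builds the dict of ALL members with dict.fromkeys, derives the old members by iterating that dict's keys against a set of currentGroupMemberIDs, and then deletes them from the dict in place.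
import Mathlib
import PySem

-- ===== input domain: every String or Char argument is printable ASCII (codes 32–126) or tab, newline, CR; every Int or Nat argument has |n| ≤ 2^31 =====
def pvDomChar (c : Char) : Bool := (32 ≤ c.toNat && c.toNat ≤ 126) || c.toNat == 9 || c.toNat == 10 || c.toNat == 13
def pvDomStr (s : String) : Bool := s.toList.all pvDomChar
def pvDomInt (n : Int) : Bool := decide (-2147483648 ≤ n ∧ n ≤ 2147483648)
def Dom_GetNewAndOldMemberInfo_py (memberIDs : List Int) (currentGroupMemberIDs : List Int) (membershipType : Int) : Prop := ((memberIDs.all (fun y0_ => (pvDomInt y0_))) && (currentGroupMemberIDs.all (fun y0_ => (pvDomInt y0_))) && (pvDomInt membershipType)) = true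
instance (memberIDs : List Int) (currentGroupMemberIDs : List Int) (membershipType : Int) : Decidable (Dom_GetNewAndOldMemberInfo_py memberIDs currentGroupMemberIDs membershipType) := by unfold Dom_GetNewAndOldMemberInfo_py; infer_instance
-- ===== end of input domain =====

-- B builds the dict of ALL members first (dict.fromkeys), derives the old members from that
-- dict's keys against a hash set of currentGroupMemberIDs, and deletes them from the dict in
-- place, so no per-member if/else partition loop remains.

-- ===== PORT A =====
def GetNewAndOldMemberInfo_py (memberIDs : List Int) (currentGroupMemberIDs : List Int) (membershipType : Int) : List Int × (List (Int × Int)) :=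
  let st := memberIDs.foldl
    (fun (acc : PySem.Set Int × PySem.Dict Int Int) memberID =>
      if memberID ∈ currentGroupMemberIDs then
        (PySem.Set.add acc.1 memberID, acc.2)
      else
        (acc.1, acc.2.insert memberID membershipType))
    (PySem.Set.empty, PySem.Dict.empty)
  (st.1, st.2.items)

-- ===== PORT B =====
def GetNewAndOldMemberInfo_py_alt (memberIDs : List Int) (currentGroupMemberIDs : List Int) (membershipType : Int) : List Int × (List (Int × Int)) :=
  -- newMembersAndMembershipType = dict.fromkeys(memberIDs, membershipType)
  let newDict0 := memberIDs.foldl (fun (d : PySem.Dict Int Int) m => d.insert m membershipType) PySem.Dict.empty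
  -- current = set(currentGroupMemberIDs)
  let current := PySem.Set.ofList currentGroupMemberIDs
  -- oldMemberIDs = {m for m in newMembersAndMembershipType if m in current}
  let oldMemberIDs := PySem.Set.ofList (newDict0.keys.filter (fun m => PySem.Set.contains current m))
  -- for m in oldMemberIDs: del newMembersAndMembershipType[m]   (every m is a key, so 'del' never raises; Dict.erase is exact here)
  let newDict := oldMemberIDs.foldl (fun (d : PySem.Dict Int Int) m => d.erase m) newDict0
  (oldMemberIDs, newDict.items)

-- ===== PRECONDITION & SPEC =====
def Spec_GetNewAndOldMemberInfo_py (memberIDs : List Int) (currentGroupMemberIDs : List Int) (membershipType : Int) (out : List Int × (List (Int × Int))) : Prop := out = GetNewAndOldMemberInfo_py_alt memberIDs currentGroupMemberIDs membershipType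
instance (memberIDs : List Int) (currentGroupMemberIDs : List Int) (membershipType : Int) (out : List Int × (List (Int × Int))) : Decidable (Spec_GetNewAndOldMemberInfo_py memberIDs currentGroupMemberIDs membershipType out) := by unfold Spec_GetNewAndOldMemberInfo_py; infer_instance

-- ===== CLAIM (what is proved, stated in full; the proofs are below) =====
def Claim_equal_GetNewAndOldMemberInfo_py : Prop := ∀ (memberIDs : List Int) (currentGroupMemberIDs : List Int) (membershipType : Int), Dom_GetNewAndOldMemberInfo_py memberIDs currentGroupMemberIDs membershipType → Spec_GetNewAndOldMemberInfo_py memberIDs currentGroupMemberIDs membershipType (GetNewAndOldMemberInfo_py memberIDs currentGroupMemberIDs membershipType)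

-- ===== LEMMAS AND PROOFS =====

-- A's single loop over a pair state splits into two independent folds.
theorem pvPairSplit (c : List Int) (t : Int) (xs : List Int) :
    ∀ (o : PySem.Set Int) (d : PySem.Dict Int Int),
    xs.foldl (fun (acc : PySem.Set Int × PySem.Dict Int Int) m =>
        if m ∈ c then (PySem.Set.add acc.1 m, acc.2) else (acc.1, acc.2.insert m t)) (o, d)
      = (xs.foldl (fun o m => if m ∈ c then PySem.Set.add o m else o) o,
         xs.foldl (fun d m => if m ∈ c then d else d.insert m t) d) := by
  induction xs with
  | nil => intro o d; rfl
  | cons x xs ih =>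
      intro o d
      simp only [List.foldl_cons]
      by_cases h : x ∈ c <;> simp [h, ih]

theorem pvDiscardFilter (p : Int → Bool) (s : List Int) (x : Int) :
    (PySem.Set.discard s x).filter p = PySem.Set.discard (s.filter p) x := by
  show (s.filter _).filter p = (s.filter p).filter _
  rw [List.filter_filter, List.filter_filter]
  congr 1; funext y; rw [Bool.and_comm]

theorem pvDiscardNotMem (s : List Int) (x : Int) (hx : x ∉ s) : PySem.Set.discard s x = s := by
  show s.filter _ = s
  apply List.filter_eq_self.2
  intro a ha
  have : a ≠ x := fun e => hx (e ▸ ha)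
  simp [this]

theorem pvOfListFilter (p : Int → Bool) (xs : List Int) :
    PySem.Set.ofList (xs.filter p) = (PySem.Set.ofList xs).filter p := by
  induction xs with
  | nil => rfl
  | cons x xs ih =>
      rw [PySem.Set.ofList_cons]
      by_cases h : p x
      · rw [List.filter_cons_of_pos h, PySem.Set.ofList_cons, ih, List.filter_cons_of_pos h,
          pvDiscardFilter]
      · rw [List.filter_cons_of_neg (by simpa using h), ih,
          List.filter_cons_of_neg (by simpa using h), pvDiscardFilter,
          pvDiscardNotMem _ _ (fun hm => h (List.of_mem_filter hm))]

-- A's dict-building loop produces the pairs of the deduplicated keys, in order.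
theorem pvDictFold (t : Int) (ys : List Int) :
    ∀ (s : List Int),
    ys.foldl (fun (d : PySem.Dict Int Int) m => d.insert m t)
        (PySem.Dict.mk (s.map (fun k => (k, t))))
      = PySem.Dict.mk ((PySem.Set.update s ys).map (fun k => (k, t))) := by
  induction ys with
  | nil => intro s; rfl
  | cons y ys ih =>
      intro s
      rw [List.foldl_cons, PySem.Set.update_cons]
      have hc : (PySem.Dict.mk (s.map (fun k => (k, t)))).contains y = PySem.Set.contains s y := by
        simp only [PySem.Dict.contains, PySem.Set.contains_eq_listContains, List.any_map,
          Function.comp_def]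
        simp [List.any_beq']
      by_cases h : PySem.Set.contains s y = true
      · have hy : y ∈ s := (PySem.Set.contains_iff s y).1 h
        have hadd : PySem.Set.add s y = s := by simp [PySem.Set.add, hy]
        have hins : (PySem.Dict.mk (s.map fun k => (k, t))).insert y t
             = PySem.Dict.mk (s.map fun k => (k, t)) := by
          apply PySem.Dict.ext
          rw [PySem.Dict.items_insert_of_contains _ _ (by rw [hc]; exact h)]
          show (s.map (fun k => (k, t))).map _ = _
          rw [List.map_map]
          apply List.map_congr_left
          intro a _
          by_cases ha : a = y <;> simp [ha]
        rw [hins, hadd, ih]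
      · have hy : y ∉ s := fun hm => h ((PySem.Set.contains_iff s y).2 hm)
        have hadd : PySem.Set.add s y = s ++ [y] := by simp [PySem.Set.add, hy]
        have hins : (PySem.Dict.mk (s.map fun k => (k, t))).insert y t
             = PySem.Dict.mk ((s ++ [y]).map fun k => (k, t)) := by
          apply PySem.Dict.ext
          rw [PySem.Dict.items_insert_of_not_contains _ _ (by rw [hc]; simpa using h)]
          simp
        rw [hins, hadd, ih]

-- B's deletion loop filters out all the erased keys at once.
theorem pvItemsFoldlErase (K : List Int) :
    ∀ (d : PySem.Dict Int Int),
    (K.foldl (fun (d : PySem.Dict Int Int) m => d.erase m) d).items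
      = d.items.filter (fun pr => !decide (pr.1 ∈ K)) := by
  induction K with
  | nil => intro d; simp
  | cons k K ih =>
      intro d
      rw [List.foldl_cons, ih]
      show (d.items.filter _).filter _ = _
      rw [List.filter_filter]
      congr 1
      funext pr
      by_cases h1 : pr.1 = k <;> by_cases h2 : pr.1 ∈ K <;> simp [h1, h2]

theorem pvMain (memberIDs currentGroupMemberIDs : List Int) (membershipType : Int) :
    GetNewAndOldMemberInfo_py memberIDs currentGroupMemberIDs membershipType
      = GetNewAndOldMemberInfo_py_alt memberIDs currentGroupMemberIDs membershipType := by
  simp only [GetNewAndOldMemberInfo_py, GetNewAndOldMemberInfo_py_alt]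
  rw [pvPairSplit]
  set S := PySem.Set.ofList memberIDs with hS
  set c := PySem.Set.ofList currentGroupMemberIDs with hc
  set p : Int → Bool := fun m => PySem.Set.contains c m with hp
  have hpmem : ∀ m : Int, p m = decide (m ∈ currentGroupMemberIDs) := by
    intro m
    simp [hp, hc, PySem.Set.contains_eq_listContains, PySem.Set.mem_ofList]
  -- B's initial dict is the deduplicated pair list
  have hdict0 : memberIDs.foldl (fun (d : PySem.Dict Int Int) m => d.insert m membershipType)
        PySem.Dict.empty = PySem.Dict.mk (S.map (fun k => (k, membershipType))) := by
    have := pvDictFold membershipType memberIDs []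
    simpa [PySem.Set.update_nil_left, hS] using this
  have hkeys : (PySem.Dict.mk (S.map (fun k => (k, membershipType)))).keys = S := by
    simp [PySem.Dict.keys, Function.comp_def]
  -- B's old set is S filtered by p
  have hold : PySem.Set.ofList
        ((PySem.Dict.mk (S.map (fun k => (k, membershipType)))).keys.filter p) = S.filter p := by
    rw [hkeys]
    exact PySem.Set.ofList_eq_self_of_nodup _ ((PySem.Set.nodup_ofList memberIDs).filter p)
  rw [hdict0, hold]
  refine Prod.ext ?_ ?_
  · -- old members
    show memberIDs.foldl (fun o m => if m ∈ currentGroupMemberIDs then PySem.Set.add o m else o) []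
       = S.filter p
    have hb : (fun (o : PySem.Set Int) m => if m ∈ currentGroupMemberIDs then PySem.Set.add o m else o)
        = (fun o m => if (decide (m ∈ currentGroupMemberIDs)) = true then PySem.Set.add o m else o) := by
      funext o m; by_cases h : m ∈ currentGroupMemberIDs <;> simp [h]
    rw [hb, ← List.foldl_filter, ← PySem.Set.ofList_eq_foldl]
    rw [show (fun m => decide (m ∈ currentGroupMemberIDs)) = p from funext (fun m => (hpmem m).symm),
      pvOfListFilter]
  · -- new members dict
    show (memberIDs.foldl (fun (d : PySem.Dict Int Int) m =>
        if m ∈ currentGroupMemberIDs then d else d.insert m membershipType) PySem.Dict.empty).items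
       = ((S.filter p).foldl (fun (d : PySem.Dict Int Int) m => d.erase m)
            (PySem.Dict.mk (S.map (fun k => (k, membershipType))))).items
    have hb : (fun (d : PySem.Dict Int Int) m =>
          if m ∈ currentGroupMemberIDs then d else d.insert m membershipType)
        = (fun d m => if (!decide (m ∈ currentGroupMemberIDs)) = true then d.insert m membershipType else d) := by
      funext d m; by_cases h : m ∈ currentGroupMemberIDs <;> simp [h]
    rw [hb, ← List.foldl_filter,
      show (PySem.Dict.empty : PySem.Dict Int Int)
          = PySem.Dict.mk (([] : List Int).map (fun k => (k, membershipType))) from rfl,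
      pvDictFold, PySem.Set.update_nil_left]
    have hA : PySem.Set.ofList (memberIDs.filter (fun m => !decide (m ∈ currentGroupMemberIDs)))
        = S.filter (fun m => !p m) := by
      rw [show (fun m => !decide (m ∈ currentGroupMemberIDs)) = (fun m => !p m) from
        funext (fun m => by rw [hpmem]), pvOfListFilter]
    rw [hA, pvItemsFoldlErase]
    show ((S.filter (fun m => !p m)).map _) = (S.map _).filter _
    rw [List.filter_map]
    congr 1
    refine List.filter_congr (fun x hx => ?_)
    show (!p x) = !decide (x ∈ S.filter p)
    by_cases h : p x = true
    · simp [h, List.mem_filter, hx]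
    · simp [List.mem_filter, h]

-- ===== VERDICT (by name: the statement is the Claim_ definition above) =====
theorem GetNewAndOldMemberInfo_py_spec : Claim_equal_GetNewAndOldMemberInfo_py := by
  intro memberIDs currentGroupMemberIDs membershipType _
  unfold Spec_GetNewAndOldMemberInfo_py
  exact pvMain memberIDs currentGroupMemberIDs membershipType
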